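-- pv_equiv track=rewrite | github.com/Fatima8024/agentic-tool-calling-eval- | flight_eval_pack/grade_simulated.py | check_tool_order_ok
-- ===== SOURCE A (Python) =====
-- def check_tool_order_ok(golden, tool_calls):
--     must_order = golden.get("pass_fail_rules", {}).get("must_call_tools_in_order", [])
--     if not must_order:
--         # For FLIGHT_003 (date confirmation) there is no required tool order
--         return True
--     names = [n for n, _ in tool_calls]
--     # check that must_order appears in sequence
--     idx = 0
--     for req in must_order:
--         try:
--             pos = names.index(req, idx)
--         except ValueError:
--             return False
--         idx = pos + 1
--     return True
-- ===== SOURCE B (Python) =====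
-- def check_tool_order_ok(golden, tool_calls):
--     must_order = golden.get("pass_fail_rules", {}).get("must_call_tools_in_order", [])
--     names = [n for n, _ in tool_calls]
--     # single pass over names, pointer into must_order
--     i = 0
--     for name in names:
--         if i < len(must_order) and name == must_order[i]:
--             i += 1
--     return i == len(must_order)
-- ===== Notes on version B (the rewrite author's own statement) =====
-- stated objective: idiomatic
-- what changed: Replaces the per-requirement names.index(req, idx) forward search (loop over must_order with try/except) by a single pass over names maintaining a pointer into must_order; the empty-must_order guard disappears since the pointer comparison covers it.
import Mathlib
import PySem

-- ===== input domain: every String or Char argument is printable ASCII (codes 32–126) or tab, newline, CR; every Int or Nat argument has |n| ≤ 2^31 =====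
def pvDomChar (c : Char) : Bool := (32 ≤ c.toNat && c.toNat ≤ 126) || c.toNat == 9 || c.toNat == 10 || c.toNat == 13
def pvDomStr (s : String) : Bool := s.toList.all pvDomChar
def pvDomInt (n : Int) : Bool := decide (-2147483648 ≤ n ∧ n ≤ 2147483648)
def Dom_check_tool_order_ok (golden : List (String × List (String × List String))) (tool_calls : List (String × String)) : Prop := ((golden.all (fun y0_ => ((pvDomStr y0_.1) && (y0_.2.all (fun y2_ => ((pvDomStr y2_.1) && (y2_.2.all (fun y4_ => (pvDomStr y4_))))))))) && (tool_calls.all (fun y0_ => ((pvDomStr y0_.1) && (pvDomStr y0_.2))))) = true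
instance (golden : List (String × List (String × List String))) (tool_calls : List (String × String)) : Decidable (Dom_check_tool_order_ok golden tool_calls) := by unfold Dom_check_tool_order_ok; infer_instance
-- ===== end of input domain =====

-- B replaces A's per-requirement forward search (names.index with a start offset) by a
-- single pass over names with a pointer into must_order (objective: idiomatic single pass; not measured faster).

-- ===== PORT A =====
-- the 'for req in must_order' loop; names.index(req, idx) is ported exactly as
-- idx + (first index of req in names.drop idx): for idx ≤ len(names) this is Python's
-- list.index(v, start), and ValueError (none) is the 'return False' branch.
def pvALoop (names : List String) (must : List String) (idx : Nat) : Bool :=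
  match must with
  | [] => true
  | req :: rest =>
    match PySem.List.index? (names.drop idx) req with
    | none => false
    | some p => pvALoop names rest (idx + p + 1)

def check_tool_order_ok (golden : List (String × List (String × List String))) (tool_calls : List (String × String)) : Bool :=
  let must_order := PySem.Dict.getD (PySem.Dict.mk (PySem.Dict.getD (PySem.Dict.mk golden) "pass_fail_rules" [])) "must_call_tools_in_order" []
  if must_order.isEmpty then true
  else
    let names := tool_calls.map (·.1)
    pvALoop names must_order 0

-- ===== PORT B =====
-- Source B's single pass: fold over names carrying the pointer i; must_order[i] is read
-- under the i < len guard, so the getD default is never the value used.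
def check_tool_order_ok_alt (golden : List (String × List (String × List String))) (tool_calls : List (String × String)) : Bool :=
  let must_order := PySem.Dict.getD (PySem.Dict.mk (PySem.Dict.getD (PySem.Dict.mk golden) "pass_fail_rules" [])) "must_call_tools_in_order" []
  let names := tool_calls.map (·.1)
  let i := names.foldl (fun i name => if i < must_order.length && name == must_order.getD i "" then i + 1 else i) 0
  i == must_order.length

-- ===== PRECONDITION & SPEC =====
def Spec_check_tool_order_ok (golden : List (String × List (String × List String))) (tool_calls : List (String × String)) (out : Bool) : Prop := out = check_tool_order_ok_alt golden tool_calls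
instance (golden : List (String × List (String × List String))) (tool_calls : List (String × String)) (out : Bool) : Decidable (Spec_check_tool_order_ok golden tool_calls out) := by unfold Spec_check_tool_order_ok; infer_instance

-- ===== CLAIM (what is proved, stated in full; the proofs are below) =====
def Claim_equal_check_tool_order_ok : Prop := ∀ (golden : List (String × List (String × List String))) (tool_calls : List (String × String)), Dom_check_tool_order_ok golden tool_calls → Spec_check_tool_order_ok golden tool_calls (check_tool_order_ok golden tool_calls)

-- ===== LEMMAS AND PROOFS =====

-- common reference: the structural greedy subsequence test
def pvGreedy : List String → List String → Bool
  | [], _ => true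
  | _ :: _, [] => false
  | r :: rs, n :: ns => if n = r then pvGreedy rs ns else pvGreedy (r :: rs) ns

theorem pvGreedy_index (r : String) (rs l : List String) :
    pvGreedy (r :: rs) l =
      match PySem.List.index? l r with
      | none => false
      | some p => pvGreedy rs (l.drop (p + 1)) := by
  induction l with
  | nil => simp [pvGreedy, PySem.List.index?]
  | cons n ns ih =>
    by_cases h : n = r
    · subst h
      rw [PySem.List.index?_cons_self]
      simp [pvGreedy]
    · rw [PySem.List.index?_cons_of_ne ns h]
      simp only [pvGreedy, if_neg h, ih]
      cases hidx : PySem.List.index? ns r <;> simp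

theorem pvALoop_eq_greedy (names must : List String) (idx : Nat) :
    pvALoop names must idx = pvGreedy must (names.drop idx) := by
  induction must generalizing idx with
  | nil => simp [pvALoop, pvGreedy]
  | cons req rest ih =>
    rw [pvGreedy_index]
    simp only [pvALoop]
    cases h : PySem.List.index? (names.drop idx) req with
    | none => rfl
    | some p =>
      dsimp only
      rw [ih, List.drop_drop, Nat.add_assoc]

theorem pvBLoop_eq_greedy (must : List String) (names : List String) (i : Nat) (hi : i ≤ must.length) :
    ((names.foldl (fun i name => if i < must.length && name == must.getD i "" then i + 1 else i) i)
       == must.length) = pvGreedy (must.drop i) names := by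
  induction names generalizing i with
  | nil =>
    rcases Nat.lt_or_ge i must.length with h | h
    · have hdrop : must.drop i = must[i] :: must.drop (i + 1) := List.drop_eq_getElem_cons h
      simp only [List.foldl_nil, hdrop, pvGreedy]
      simpa using Nat.ne_of_lt h
    · have : i = must.length := le_antisymm hi h
      subst this
      rw [List.drop_length]
      simp only [List.foldl_nil, pvGreedy, beq_self_eq_true]
  | cons n ns ih =>
    rcases Nat.lt_or_ge i must.length with h | h
    · have hdrop : must.drop i = must[i] :: must.drop (i + 1) := List.drop_eq_getElem_cons h
      have hget : must.getD i "" = must[i] := List.getD_eq_getElem _ _ h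
      simp only [List.foldl_cons, hdrop, pvGreedy, hget, h, decide_true, Bool.true_and]
      by_cases hn : n = must[i]
      · simp only [hn, beq_self_eq_true, if_true]
        exact ih (i + 1) h
      · have : (n == must[i]) = false := beq_eq_false_iff_ne.mpr hn
        simp only [this, if_neg hn, Bool.false_eq_true, if_false]
        rw [ih i hi, hdrop]
    · have : i = must.length := le_antisymm hi h
      subst this
      have hguard : ¬ (must.length < must.length) := lt_irrefl _
      simp only [List.foldl_cons, hguard, decide_false, Bool.false_and, Bool.false_eq_true, if_false]
      rw [ih _ hi, List.drop_length]
      cases hg : pvGreedy [] ns <;> simp_all [pvGreedy]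

-- ===== VERDICT (by name: the statement is the Claim_ definition above) =====
theorem check_tool_order_ok_spec : Claim_equal_check_tool_order_ok := by
  intro golden tool_calls _
  unfold Spec_check_tool_order_ok check_tool_order_ok check_tool_order_ok_alt
  set must := PySem.Dict.getD (PySem.Dict.mk (PySem.Dict.getD (PySem.Dict.mk golden) "pass_fail_rules" [])) "must_call_tools_in_order" [] with hmust
  set names := tool_calls.map (·.1) with hnames
  rw [pvBLoop_eq_greedy must names 0 (Nat.zero_le _)]
  cases must with
  | nil => simp [pvGreedy]
  | cons r rs =>
    simp only [List.isEmpty_cons, Bool.false_eq_true, if_false]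
    rw [pvALoop_eq_greedy]
    simp
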